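-- pv_equiv track=rewrite | github.com/louisun/iSearch | iSearch/parser.py | deal_synonyms
-- ===== SOURCE A (Python) =====
-- def deal_synonyms(wlist):
--     synonyms_list = []
--     tmp_text = ''
--     for i in wlist:
--         if '.' in i:
--             #下一个元素，保存当前元素
--             if '' != tmp_text:
--                 synonyms_list.append(tmp_text)
--             #这里添加例子如下 adj. 温柔的；柔软的；脆弱的；幼稚的；难对付的
--             tmp_text = i + '\n'
--         else:
--             #这里添加近义词
--             #2->adj. 温柔的；柔软的；脆弱的；幼稚的；难对付的\nsoft
--             #2->adj. 温柔的；柔软的；脆弱的；幼稚的；难对付的\nsoft,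
--             #2->adj. 温柔的；柔软的；脆弱的；幼稚的；难对付的\nsoft,fond
--             tmp_text = tmp_text + i
--
--     if '' != tmp_text:
--         synonyms_list.append(tmp_text)
--
--     return synonyms_list
-- ===== SOURCE B (Python) =====
-- def deal_synonyms(wlist):
--     # pass 1: partition into groups; a dot-bearing element starts a new group
--     groups = []
--     cur = []
--     for w in wlist:
--         if '.' in w:
--             groups.append(cur)
--             cur = [w]
--         else:
--             cur.append(w)
--     groups.append(cur)
--     # pass 2: format each group
--     formatted = []
--     for g in groups:
--         if g and '.' in g[0]:
--             formatted.append(g[0] + '\n' + ''.join(g[1:]))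
--         else:
--             formatted.append(''.join(g))
--     # keep only nonempty strings
--     return [s for s in formatted if s != '']
-- ===== Notes on version B (the rewrite author's own statement) =====
-- stated objective: alternative
-- what changed: A builds each output string incrementally in one flush-on-dot accumulator loop; B first partitions wlist into group sublists (new group at each dot-bearing element), then formats each group in a separate pass (header + newline + joined rest, or plain join for the leading headerless group), and finally filters out empty strings.
import Mathlib
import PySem

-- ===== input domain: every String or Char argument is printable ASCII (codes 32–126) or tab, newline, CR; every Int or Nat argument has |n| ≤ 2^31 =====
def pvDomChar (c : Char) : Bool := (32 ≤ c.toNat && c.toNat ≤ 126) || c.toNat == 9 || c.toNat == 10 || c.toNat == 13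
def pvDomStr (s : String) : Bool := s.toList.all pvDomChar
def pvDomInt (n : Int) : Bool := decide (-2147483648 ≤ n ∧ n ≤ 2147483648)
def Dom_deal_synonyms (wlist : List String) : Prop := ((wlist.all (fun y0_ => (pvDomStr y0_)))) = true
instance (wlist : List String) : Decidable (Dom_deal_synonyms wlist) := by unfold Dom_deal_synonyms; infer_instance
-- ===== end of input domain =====

-- B replaces A's single accumulate-and-flush loop by two passes — partition into
-- groups, then format each group — plus a final nonempty filter (objective: alternative decomposition).


-- ===== PORT A =====
-- the for-loop over wlist with state (synonyms_list, tmp_text)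
def dealALoop (acc : List String) (tmp : String) : List String → List String × String
  | [] => (acc, tmp)
  | i :: rest =>
    if PySem.Str.isIn "." i then
      dealALoop (if "" ≠ tmp then acc ++ [tmp] else acc) (i ++ "\n") rest
    else
      dealALoop acc (tmp ++ i) rest

def deal_synonyms (wlist : List String) : List String :=
  let (synonyms_list, tmp_text) := dealALoop [] "" wlist
  if "" ≠ tmp_text then synonyms_list ++ [tmp_text] else synonyms_list

-- ===== PORT B =====
-- pass 1: partition into groups; a dot-bearing element starts a new group
def synGroups (cur : List String) : List String → List (List String)
  | [] => [cur]
  | w :: rest =>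
    if PySem.Str.isIn "." w then cur :: synGroups [w] rest
    else synGroups (cur ++ [w]) rest

-- pass 2: format one group
def synFmt : List String → String
  | [] => PySem.Str.join "" []
  | h :: t =>
    if PySem.Str.isIn "." h then h ++ "\n" ++ PySem.Str.join "" t
    else PySem.Str.join "" (h :: t)

def deal_synonyms_alt (wlist : List String) : List String :=
  ((synGroups [] wlist).map synFmt).filter (· ≠ "")

-- ===== PRECONDITION & SPEC =====
def Spec_deal_synonyms (wlist : List String) (out : List String) : Prop := out = deal_synonyms_alt wlist
instance (wlist : List String) (out : List String) : Decidable (Spec_deal_synonyms wlist out) := by unfold Spec_deal_synonyms; infer_instance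

-- ===== CLAIM (what is proved, stated in full; the proofs are below) =====
def Claim_equal_deal_synonyms : Prop := ∀ (wlist : List String), Dom_deal_synonyms wlist → Spec_deal_synonyms wlist (deal_synonyms wlist)

-- ===== LEMMAS AND PROOFS =====
lemma intercalate_nil_flatten (xs : List (List Char)) : [].intercalate xs = xs.flatten := by
  induction xs with
  | nil => rfl
  | cons h t ih => cases t <;> simp_all [List.intercalate, List.intersperse]

lemma join_nil_str : PySem.Str.join "" ([] : List String) = "" := rfl

lemma join_cons (h : String) (t : List String) :
    PySem.Str.join "" (h :: t) = h ++ PySem.Str.join "" t := by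
  simp [PySem.Str.join, PySem.Chars.join, intercalate_nil_flatten, String.ofList_append]

lemma join_snoc (t : List String) (w : String) :
    PySem.Str.join "" (t ++ [w]) = PySem.Str.join "" t ++ w := by
  induction t with
  | nil => simp [join_cons, join_nil_str]
  | cons h t ih => simp [join_cons, ih, String.append_assoc]

lemma synFmt_snoc (cur : List String) (w : String)
    (hw : PySem.Chars.isIn ['.'] w.toList = false) :
    synFmt (cur ++ [w]) = synFmt cur ++ w := by
  cases cur with
  | nil => simp [synFmt, hw, join_cons, join_nil_str]
  | cons h t =>
    by_cases hd : PySem.Chars.isIn ['.'] h.toList = true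
    · simp [synFmt, hd, join_snoc, String.append_assoc]
    · simp [synFmt, hd, join_cons, join_snoc, String.append_assoc]

def dealAFinish (p : List String × String) : List String :=
  if "" ≠ p.2 then p.1 ++ [p.2] else p.1

lemma dealA_eq_groups (ws : List String) : ∀ (acc : List String) (cur : List String),
    dealAFinish (dealALoop acc (synFmt cur) ws)
      = acc ++ ((synGroups cur ws).map synFmt).filter (· ≠ "") := by
  induction ws with
  | nil =>
    intro acc cur
    simp only [dealALoop, synGroups, List.map, List.filter, dealAFinish]
    by_cases h : synFmt cur = "" <;> simp [h]
  | cons w rest ih =>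
    intro acc cur
    by_cases hw : PySem.Chars.isIn ['.'] w.toList = true
    · have hb : PySem.Str.isIn "." w = true := by simpa using hw
      simp only [dealALoop, synGroups, hb, if_pos]
      have h1 : w ++ "\n" = synFmt [w] := by
        simp [synFmt, hw, join_nil_str]
      rw [h1, ih]
      by_cases h : synFmt cur = "" <;>
        simp [h, List.append_assoc]
    · have hb : PySem.Str.isIn "." w = false := by simpa using hw
      simp only [dealALoop, synGroups, hb, Bool.false_eq_true, if_neg, not_false_iff]
      rw [← synFmt_snoc cur w (by simpa using hw), ih]

-- ===== VERDICT (by name: the statement is the Claim_ definition above) =====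
theorem deal_synonyms_spec : Claim_equal_deal_synonyms := by
  intro wlist _
  show deal_synonyms wlist = deal_synonyms_alt wlist
  have h := dealA_eq_groups wlist [] []
  simpa [deal_synonyms, deal_synonyms_alt, dealAFinish, synFmt, join_nil_str] using h
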